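-- pv_equiv track=rewrite | github.com/SunBK201/ScubaTrace | scubatrace/differ.py | diff_lines_group
-- ===== SOURCE A (Python) =====
-- def diff_lines_group(diff_lines: list[int]) -> list[list[int]]:
--     """
--     Group consecutive line numbers into sublists.
--
--     Args:
--         diff_lines (list[int]): A list of line numbers.
--
--     Returns:
--         list[list[int]]: A list of lists, where each sublist contains consecutive line numbers
--     """
--
--     if not diff_lines:
--         return []
--     diff_lines = sorted(diff_lines)
--     groups = []
--     current_group = [diff_lines[0]]
--     for line in diff_lines[1:]:
--         if line == current_group[-1] + 1:
--             current_group.append(line)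
--         else:
--             groups.append(current_group)
--             current_group = [line]
--     groups.append(current_group)
--     return groups
-- ===== SOURCE B (Python) =====
-- def diff_lines_group(diff_lines: list[int]) -> list[list[int]]:
--     """Staged-pass reformulation: sort, compute the break indices where the
--     +1-chain stops, then cut the sorted list at those edges with slices."""
--     s = sorted(diff_lines)
--     edges = [0] + [i for i in range(1, len(s)) if s[i] != s[i - 1] + 1] + [len(s)]
--     return [s[a:b] for a, b in zip(edges, edges[1:])] if s else []
-- ===== Notes on version B (the rewrite author's own statement) =====
-- stated objective: alternative
-- what changed: B replaces A's single accumulator loop (current_group grown element by element, flushed into groups) by staged passes: it first computes the list of break indices where the sorted values stop increasing by 1, then cuts the sorted list with slices between adjacent edges.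
import Mathlib
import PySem

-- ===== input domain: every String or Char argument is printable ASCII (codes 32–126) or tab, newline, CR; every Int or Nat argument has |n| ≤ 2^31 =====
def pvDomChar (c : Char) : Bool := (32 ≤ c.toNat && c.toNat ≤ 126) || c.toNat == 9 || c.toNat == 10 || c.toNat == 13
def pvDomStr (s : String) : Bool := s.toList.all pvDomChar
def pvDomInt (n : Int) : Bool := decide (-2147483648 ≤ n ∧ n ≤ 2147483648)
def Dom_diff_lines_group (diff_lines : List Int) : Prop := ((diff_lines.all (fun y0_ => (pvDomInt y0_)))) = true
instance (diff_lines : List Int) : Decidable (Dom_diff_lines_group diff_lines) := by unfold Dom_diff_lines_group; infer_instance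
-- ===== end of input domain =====

-- B replaces A's single accumulator loop by staged passes: compute the break indices of the
-- sorted list, then cut it with slices between adjacent edges. Same asymptotic cost.

-- ===== PORT A =====
-- the loop over diff_lines[1:] with state (current_group, groups);
-- current_group[-1] is ported as getLast! (current_group is always nonempty, so this is exact)
def dlgLoop : List Int → List Int → List (List Int) → List (List Int)
  | [], cur, groups => groups ++ [cur]
  | x :: xs, cur, groups =>
      if x = cur.getLast! + 1 then dlgLoop xs (cur ++ [x]) groups
      else dlgLoop xs [x] (groups ++ [cur])

def diff_lines_group (diff_lines : List Int) : List (List Int) :=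
  if diff_lines = [] then []
  else
    match PySem.List.sorted diff_lines (fun x => x) false with
    | [] => []  -- unreachable: sorted of a nonempty list is nonempty
    | h :: t => dlgLoop t [h] []

-- ===== PORT B =====
-- edges = [0] + [i for i in range(1, len(s)) if s[i] != s[i-1] + 1] + [len(s)];
-- the indices i and i-1 are always in range, so pyGet? is always some and .getD 0 is exact
def diff_lines_group_alt (diff_lines : List Int) : List (List Int) :=
  let s := PySem.List.sorted diff_lines (fun x => x) false
  let edges : List Int :=
    (0 : Int) :: ((PySem.List.pyRange 1 (s.length : Int) 1).filter (fun i =>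
      (PySem.List.pyGet? s i).getD 0 != (PySem.List.pyGet? s (i - 1)).getD 0 + 1)) ++
      [(s.length : Int)]
  if s = [] then []
  else (edges.zip edges.tail).map (fun p => PySem.List.slice s (some p.1) (some p.2))

-- ===== PRECONDITION & SPEC =====
def Spec_diff_lines_group (diff_lines : List Int) (out : List (List Int)) : Prop := out = diff_lines_group_alt diff_lines
instance (diff_lines : List Int) (out : List (List Int)) : Decidable (Spec_diff_lines_group diff_lines out) := by unfold Spec_diff_lines_group; infer_instance

-- ===== CLAIM (what is proved, stated in full; the proofs are below) =====
def Claim_equal_diff_lines_group : Prop := ∀ (diff_lines : List Int), Dom_diff_lines_group diff_lines → Spec_diff_lines_group diff_lines (diff_lines_group diff_lines)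

-- ===== LEMMAS AND PROOFS =====

def takeRun : Int → List Int → List Int × List Int
  | _, [] => ([], [])
  | prev, x :: xs =>
      if x = prev + 1 then ((takeRun x xs).1.cons x, (takeRun x xs).2)
      else ([], x :: xs)
lemma takeRun_append (p : Int) (t : List Int) :
    (takeRun p t).1 ++ (takeRun p t).2 = t := by
  induction t generalizing p with
  | nil => rfl
  | cons x xs ih =>
      simp only [takeRun]
      by_cases h : x = p + 1
      · simp [h, ih (p + 1)]
      · simp [h]
lemma takeRun_snd_length (p : Int) (t : List Int) :
    (takeRun p t).2.length ≤ t.length := by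
  conv_rhs => rw [← takeRun_append p t]
  simp
def chop : List Int → List (List Int)
  | [] => []
  | h :: t => (h :: (takeRun h t).1) :: chop (takeRun h t).2
termination_by s => s.length
decreasing_by
  have := takeRun_snd_length h t
  simp only [List.length_cons]
  omega
def bndI : Int → List Int → Int → List Int
  | _, [], _ => []
  | p, x :: xs, i => if x = p + 1 then bndI x xs (i + 1) else i :: bndI x xs (i + 1)
lemma bndI_takeRun (p : Int) (t : List Int) (i : Int) :
    bndI p t i =
      match takeRun p t with
      | (_, []) => []
      | (r, x :: xs) => (i + r.length) :: bndI x xs (i + r.length + 1) := by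
  induction t generalizing p i with
  | nil => rfl
  | cons x xs ih =>
      simp only [bndI, takeRun]
      by_cases h : x = p + 1
      · rw [if_pos h, if_pos h, ih x (i + 1)]
        cases hr : takeRun x xs with
        | mk r rest =>
            cases rest with
            | nil => simp
            | cons y ys =>
                simp only [List.length_cons]
                push_cast
                ring_nf
      · rw [if_neg h, if_neg h]
        simp

lemma slices_eq_chop_aux (N : Nat) : ∀ (t : List Int), t.length ≤ N →
    ∀ (p : Int) (m : Nat) (full : List Int), full.drop m = p :: t →
    ((((m : Int) :: (bndI p t ((m : Int) + 1) ++ [(full.length : Int)])).zip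
        (((m : Int) :: (bndI p t ((m : Int) + 1) ++ [(full.length : Int)])).tail)).map
      (fun q => PySem.List.slice full (some q.1) (some q.2))) = chop (p :: t) := by
  induction N with
  | zero =>
      intro t ht p m full hfull
      have ht0 : t = [] := List.eq_nil_of_length_eq_zero (Nat.le_zero.mp ht)
      subst ht0
      rw [chop]
      simp only [takeRun, bndI, List.nil_append, chop]
      -- zip [m, len] [len] → [(m, len)]
      simp only [List.zip, List.tail, List.zipWith, List.map]
      have hs : PySem.List.slice full (some (m : Int)) (some ((full.length : Nat) : Int)) =
          (full.drop m).take (full.length - m) := PySem.List.slice_natCast full m full.length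
      rw [hs, hfull]
      have hlen : ((p : Int) :: ([] : List Int)).length ≤ full.length - m := by
        rw [← hfull, List.length_drop]
      rw [List.take_of_length_le hlen]
  | succ n ih =>
      intro t ht p m full hfull
      rw [chop, bndI_takeRun]
      cases hr : takeRun p t with
      | mk r rest =>
          have hrt : r ++ rest = t := by
            have := takeRun_append p t; rwa [hr] at this
          cases rest with
          | nil =>
              simp only []
              -- r = t
              have hrt' : r = t := by simpa using hrt
              subst hrt'
              simp only [List.nil_append, chop]
              simp only [List.zip, List.tail, List.zipWith, List.map]
              have hs : PySem.List.slice full (some (m : Int)) (some ((full.length : Nat) : Int)) =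
                  (full.drop m).take (full.length - m) := PySem.List.slice_natCast full m full.length
              rw [hs, hfull]
              have hlen : (p :: r).length ≤ full.length - m := by
                rw [← hfull, List.length_drop]
              rw [List.take_of_length_le hlen]
          | cons x xs =>
              simp only []
              have hcast1 : (m : Int) + 1 + (r.length : Int) = ((m + (r.length + 1) : Nat) : Int) := by
                push_cast; ring
              have hcast2 : (m : Int) + 1 + (r.length : Int) + 1 = ((m + (r.length + 1) : Nat) : Int) + 1 := by
                push_cast; ring
              rw [hcast1]
              clear hcast2
              set m' : Nat := m + (r.length + 1) with hm'
              -- drop m' full = x :: xs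
              have hdrop' : full.drop m' = x :: xs := by
                have h1 : full.drop m' = (full.drop m).drop (r.length + 1) := by
                  rw [List.drop_drop]
                rw [h1, hfull, List.drop_succ_cons, ← hrt, List.drop_left]
              have hxs : xs.length ≤ n := by
                have : t.length ≤ n + 1 := ht
                rw [← hrt] at this
                simp at this
                omega
              have hih := ih xs hxs x m' full hdrop'
              -- assemble
              simp only [List.tail_cons] at hih
              simp only [List.cons_append, List.tail_cons, List.zip_cons_cons, List.map_cons]
              rw [hih]
              congr 1
              rw [PySem.List.slice_natCast full m m', hfull,
                show m' - m = r.length + 1 from by omega,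
                List.take_succ_cons, ← hrt, List.take_left]

lemma filter_range_eq_bndI (t : List Int) : ∀ (pre : List Int) (p : Int),
    ((PySem.List.pyRange ((pre.length : Int) + 1) (((pre ++ p :: t).length : Int)) 1).filter
      (fun i =>
        (PySem.List.pyGet? (pre ++ p :: t) i).getD 0 !=
          (PySem.List.pyGet? (pre ++ p :: t) (i - 1)).getD 0 + 1)) =
    bndI p t ((pre.length : Int) + 1) := by
  induction t with
  | nil =>
      intro pre p
      rw [PySem.List.pyRange_one_eq_nil (by simp)]
      rfl
  | cons x xs ih =>
      intro pre p
      have hlt : (pre.length : Int) + 1 < ((pre ++ p :: x :: xs).length : Int) := by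
        simp only [List.length_append, List.length_cons]
        push_cast
        omega
      rw [PySem.List.pyRange_one_cons hlt, List.filter_cons]
      have hx : PySem.List.pyGet? (pre ++ p :: x :: xs) ((pre.length : Int) + 1) = some x := by
        have : pre ++ p :: x :: xs = (pre ++ [p]) ++ x :: xs := by simp
        rw [this]
        have hl : ((pre.length : Int) + 1) = (((pre ++ [p]).length : Int)) := by simp
        rw [hl, PySem.List.pyGet?_append_length]
      have hp : PySem.List.pyGet? (pre ++ p :: x :: xs) ((pre.length : Int) + 1 - 1) = some p := by
        have hl : ((pre.length : Int) + 1 - 1) = ((pre.length : Int)) := by ring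
        rw [hl, PySem.List.pyGet?_append_length]
      have htail :
          (PySem.List.pyRange ((pre.length : Int) + 1 + 1) (((pre ++ p :: x :: xs).length : Int)) 1).filter
            (fun i =>
              (PySem.List.pyGet? (pre ++ p :: x :: xs) i).getD 0 !=
                (PySem.List.pyGet? (pre ++ p :: x :: xs) (i - 1)).getD 0 + 1) =
          bndI x xs ((pre.length : Int) + 1 + 1) := by
        have hpre : pre ++ p :: x :: xs = (pre ++ [p]) ++ x :: xs := by simp
        have hidx : (pre.length : Int) + 1 + 1 = (((pre ++ [p]).length : Int)) + 1 := by simp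
        rw [hpre, hidx, ih (pre ++ [p]) x]
      by_cases h : x = p + 1
      · simp only [hx, hp, Option.getD_some, show (x != p + 1) = false from by simp [h],
          Bool.false_eq_true, if_false, htail, bndI, if_pos h]
      · simp only [hx, hp, Option.getD_some, show (x != p + 1) = true from by simp [h],
          if_true, htail, bndI, if_neg h]

-- A's loop computes chop (cur glued in front)
lemma dlgLoop_eq_chop (t : List Int) : ∀ (cur : List Int) (groups : List (List Int)),
    cur ≠ [] →
    dlgLoop t cur groups =
      groups ++ (cur ++ (takeRun cur.getLast! t).1) :: chop (takeRun cur.getLast! t).2 := by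
  induction t with
  | nil =>
      intro cur groups _
      simp [dlgLoop, takeRun, chop]
  | cons x xs ih =>
      intro cur groups hcur
      simp only [dlgLoop, takeRun]
      by_cases h : x = cur.getLast! + 1
      · rw [if_pos h, if_pos h]
        have hne : cur ++ [x] ≠ [] := by simp
        rw [ih (cur ++ [x]) groups hne]
        have hl : (cur ++ [x]).getLast! = x := by cases cur <;> simp [List.getLast!]
        rw [hl]
        simp
      · rw [if_neg h, if_neg h]
        have hne : ([x] : List Int) ≠ [] := by simp
        rw [ih [x] (groups ++ [cur]) hne]
        have hl : ([x] : List Int).getLast! = x := rfl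
        rw [hl]
        rw [show chop (x :: xs) = (x :: (takeRun x xs).1) :: chop (takeRun x xs).2 from by
          rw [chop]]
        simp

lemma portB_eq_chop (diff_lines : List Int) :
    diff_lines_group_alt diff_lines =
      chop (PySem.List.sorted diff_lines (fun x => x) false) := by
  unfold diff_lines_group_alt
  generalize PySem.List.sorted diff_lines (fun x => x) false = s
  cases s with
  | nil => simp [chop]
  | cons h t =>
      rw [if_neg (by simp)]
      have hf := filter_range_eq_bndI t [] h
      norm_num at hf
      have hslices := slices_eq_chop_aux t.length t le_rfl h 0 (h :: t) (by simp)
      norm_num at hslices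
      simp only [List.length_cons]
      push_cast
      rw [hf]
      exact hslices

-- ===== VERDICT (by name: the statement is the Claim_ definition above) =====
theorem diff_lines_group_spec : Claim_equal_diff_lines_group := by
  intro diff_lines _
  unfold Spec_diff_lines_group
  rw [portB_eq_chop]
  unfold diff_lines_group
  by_cases hnil : diff_lines = []
  · subst hnil
    rw [if_pos rfl, show PySem.List.sorted ([] : List Int) (fun x => x) false = [] from rfl,
      chop]
  · rw [if_neg hnil]
    cases hm : PySem.List.sorted diff_lines (fun x => x) false with
    | nil =>
        exact absurd ((PySem.List.sorted_eq_nil_iff _ _ _).mp hm) hnil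
    | cons h t =>
        show dlgLoop t [h] [] = chop (h :: t)
        have := dlgLoop_eq_chop t [h] [] (by simp)
        rw [this, show ([h] : List Int).getLast! = h from rfl,
          show chop (h :: t) = (h :: (takeRun h t).1) :: chop (takeRun h t).2 from by rw [chop]]
        simp
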